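-- pv_equiv track=rewrite | github.com/wwt123666/- | util.py | get_cell_list_by_angle
-- ===== SOURCE A (Python) =====
-- def get_cell_list_by_angle(cell_list, angle):
--     angle_dict = {
--         0: (1, 0, 0, 1),
--         1: (0, 1, -1, 0),
--         2: (-1, 0, 0, -1),
--         3: (0, -1, 1, 0),
--     }
--     a, b, c, d = angle_dict[angle]
--     if angle == 0:
--         return cell_list
--
--     rotate_cell_list = []
--     for cell in cell_list:
--         cc, cr = cell
--         rc, rr = a * cc + b * cr, c * cc + d * cr
--         rotate_cell_list.append((rc, rr))
--
--     return rotate_cell_list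
-- ===== SOURCE B (Python) =====
-- def get_cell_list_by_angle(cell_list, angle):
--     if angle == 0:
--         return cell_list
--     return get_cell_list_by_angle([(cr, -cc) for cc, cr in cell_list], angle - 1)
-- ===== Notes on version B (the rewrite author's own statement) =====
-- stated objective: simpler
-- what changed: Replaces the 4-entry rotation-matrix table and per-entry 2x2 multiply by a recursion that peels off one quarter-turn (c,r)->(r,-c) per step until angle reaches 0; Pre_ excludes angles outside {0,1,2,3}, where A raises KeyError.
import Mathlib
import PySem

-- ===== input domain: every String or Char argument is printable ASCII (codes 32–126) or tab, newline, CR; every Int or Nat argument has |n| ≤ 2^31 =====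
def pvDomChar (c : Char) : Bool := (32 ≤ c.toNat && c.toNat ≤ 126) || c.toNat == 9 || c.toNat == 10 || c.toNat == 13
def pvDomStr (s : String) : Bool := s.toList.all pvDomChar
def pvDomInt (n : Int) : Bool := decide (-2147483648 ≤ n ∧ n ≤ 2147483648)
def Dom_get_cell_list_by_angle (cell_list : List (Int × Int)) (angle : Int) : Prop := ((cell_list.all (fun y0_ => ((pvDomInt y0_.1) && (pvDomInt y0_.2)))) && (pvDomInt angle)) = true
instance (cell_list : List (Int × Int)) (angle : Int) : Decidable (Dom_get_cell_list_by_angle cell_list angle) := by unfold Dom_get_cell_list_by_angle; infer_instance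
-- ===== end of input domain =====

-- B replaces A's 4-entry rotation-matrix table and 2x2 multiply by a recursion
-- peeling one quarter-turn (c,r) -> (r,-c) per step until angle = 0 (objective: simpler).

-- ===== PORT A =====
def get_cell_list_by_angle (cell_list : List (Int × Int)) (angle : Int) : List (Int × Int) :=
  let angle_dict : PySem.Dict Int (Int × Int × Int × Int) :=
    PySem.Dict.ofList [(0, (1, 0, 0, 1)), (1, (0, 1, -1, 0)), (2, (-1, 0, 0, -1)), (3, (0, -1, 1, 0))]
  match angle_dict.get? angle with
  | none => []   -- KeyError in Python; excluded by Pre_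
  | some (a, b, c, d) =>
    if angle = 0 then cell_list
    else
      cell_list.foldl
        (fun acc cell => acc ++ [(a * cell.1 + b * cell.2, c * cell.1 + d * cell.2)]) []

-- ===== PORT B =====
def get_cell_list_by_angle_alt (cell_list : List (Int × Int)) (angle : Int) : List (Int × Int) :=
  if angle = 0 then cell_list
  else if angle < 0 then []   -- Python B never returns here (RecursionError); excluded by Pre_
  else get_cell_list_by_angle_alt (cell_list.map (fun cell => (cell.2, -cell.1))) (angle - 1)
termination_by angle.toNat
decreasing_by omega

-- ===== PRECONDITION & SPEC =====
-- A raises KeyError for any angle not a key of angle_dict.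
def Pre_get_cell_list_by_angle (cell_list : List (Int × Int)) (angle : Int) : Prop :=
  angle = 0 ∨ angle = 1 ∨ angle = 2 ∨ angle = 3
instance (cell_list : List (Int × Int)) (angle : Int) : Decidable (Pre_get_cell_list_by_angle cell_list angle) := by unfold Pre_get_cell_list_by_angle; infer_instance

def pvWitness_get_cell_list_by_angle : (List (Int × Int)) × Int := ([(1, 2), (-3, 0)], 2)

def Spec_get_cell_list_by_angle (cell_list : List (Int × Int)) (angle : Int) (out : List (Int × Int)) : Prop := out = get_cell_list_by_angle_alt cell_list angle
instance (cell_list : List (Int × Int)) (angle : Int) (out : List (Int × Int)) : Decidable (Spec_get_cell_list_by_angle cell_list angle out) := by unfold Spec_get_cell_list_by_angle; infer_instance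

-- ===== CLAIM (what is proved, stated in full; the proofs are below) =====
def Claim_equal_get_cell_list_by_angle : Prop := ∀ (cell_list : List (Int × Int)) (angle : Int), Dom_get_cell_list_by_angle cell_list angle → Pre_get_cell_list_by_angle cell_list angle → Spec_get_cell_list_by_angle cell_list angle (get_cell_list_by_angle cell_list angle)

-- ===== LEMMAS AND PROOFS =====

-- ===== VERDICT (by name: the statement is the Claim_ definition above) =====
theorem get_cell_list_by_angle_spec : Claim_equal_get_cell_list_by_angle := by
  intro cell_list angle hdom hpre
  clear hdom
  unfold Spec_get_cell_list_by_angle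
  rcases hpre with h | h | h | h <;> subst h <;>
    simp [get_cell_list_by_angle, get_cell_list_by_angle_alt,
          PySem.Dict.get?, PySem.Dict.ofList, PySem.Dict.update, PySem.Dict.insert, PySem.Dict.empty, PySem.Dict.contains,
          List.map_map] <;>
    (induction cell_list with
     | nil => simp
     | cons head tail ih => simp [ih])
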